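-- pv_equiv track=rewrite | github.com/res2k/shader1 | build/generate_char_data.py | RangeDataSize
-- ===== SOURCE A (Python) =====
-- def RangeDataSize(cp_range, prop_map):
--   num_ui32 = 0
--   for cp in range(cp_range[0], cp_range[1]):
--     if not cp in prop_map:
--       num_ui32 += 1
--       continue
--     mapped_seq = prop_map[cp]
--     if len(mapped_seq) == 1:
--       num_ui32 += 1
--     else:
--       num_ui32 += 1 + len(mapped_seq)
--   return num_ui32 * 4
-- ===== SOURCE B (Python) =====
-- def RangeDataSize(cp_range, prop_map):
--   lo = cp_range[0]
--   hi = cp_range[1]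
--   total = max(0, hi - lo)
--   for k, v in prop_map.items():
--     if lo <= k < hi and len(v) > 1:
--       total += len(v)
--   return total * 4
-- ===== Notes on version B (the rewrite author's own statement) =====
-- stated objective: alternative
-- what changed: Instead of walking every codepoint of the range and looking each one up in the dict, B takes the range length as the base count and makes a single pass over the dict's entries, adding len(v) for entries that fall in the range with len(v) > 1; this trades O(range length) lookups for O(|prop_map|) entry checks.
import Mathlib
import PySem

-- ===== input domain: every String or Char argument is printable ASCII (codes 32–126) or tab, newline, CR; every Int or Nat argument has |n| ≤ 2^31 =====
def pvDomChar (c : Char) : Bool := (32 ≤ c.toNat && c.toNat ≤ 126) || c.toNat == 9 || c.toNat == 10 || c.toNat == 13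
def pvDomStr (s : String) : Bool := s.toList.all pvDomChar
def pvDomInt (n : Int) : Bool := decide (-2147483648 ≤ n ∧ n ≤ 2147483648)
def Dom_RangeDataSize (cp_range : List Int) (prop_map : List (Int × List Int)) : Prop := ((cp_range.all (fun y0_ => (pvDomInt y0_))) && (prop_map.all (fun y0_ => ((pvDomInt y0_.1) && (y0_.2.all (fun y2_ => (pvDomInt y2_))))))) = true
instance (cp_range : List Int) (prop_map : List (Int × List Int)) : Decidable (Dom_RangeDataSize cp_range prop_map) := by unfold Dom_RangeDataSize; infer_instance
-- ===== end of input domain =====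

-- B replaces A's per-codepoint loop with one pass over the dict's entries plus the range length as base count (alternative algorithm).


-- ===== PORT A =====
def RangeDataSize (cp_range : List Int) (prop_map : List (Int × List Int)) : Int :=
  let num_ui32 : Int :=
    (PySem.List.pyRange (PySem.List.pyGetD cp_range 0 0) (PySem.List.pyGetD cp_range 1 0) 1).foldl
      (fun acc cp =>
        match List.lookup cp prop_map with
        | none => acc + 1
        | some mapped_seq =>
          if mapped_seq.length = 1 then acc + 1 else acc + 1 + (mapped_seq.length : Int)) 0
  num_ui32 * 4

-- ===== PORT B =====
def RangeDataSize_alt (cp_range : List Int) (prop_map : List (Int × List Int)) : Int :=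
  let lo := PySem.List.pyGetD cp_range 0 0
  let hi := PySem.List.pyGetD cp_range 1 0
  let total : Int := max 0 (hi - lo)
  let total := prop_map.foldl
    (fun acc kv => if lo ≤ kv.1 ∧ kv.1 < hi ∧ 1 < kv.2.length then acc + (kv.2.length : Int) else acc) total
  total * 4

-- ===== PRECONDITION & SPEC =====
-- Pre_ excludes cp_range with fewer than 2 elements (Python A raises IndexError there) and
-- association lists with duplicate keys, which do not represent a Python dict (prop_map is a dict in A).
def Pre_RangeDataSize (cp_range : List Int) (prop_map : List (Int × List Int)) : Prop :=
  2 ≤ cp_range.length ∧ (prop_map.map Prod.fst).Nodup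
instance (cp_range : List Int) (prop_map : List (Int × List Int)) : Decidable (Pre_RangeDataSize cp_range prop_map) := by unfold Pre_RangeDataSize; infer_instance
def pvWitness_RangeDataSize : List Int × (List (Int × List Int)) := ([0, 3], [(1, [5, 6])])

def Spec_RangeDataSize (cp_range : List Int) (prop_map : List (Int × List Int)) (out : Int) : Prop := out = RangeDataSize_alt cp_range prop_map
instance (cp_range : List Int) (prop_map : List (Int × List Int)) (out : Int) : Decidable (Spec_RangeDataSize cp_range prop_map out) := by unfold Spec_RangeDataSize; infer_instance

-- ===== CLAIM (what is proved, stated in full; the proofs are below) =====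
def Claim_equal_RangeDataSize : Prop := ∀ (cp_range : List Int) (prop_map : List (Int × List Int)), Dom_RangeDataSize cp_range prop_map → Pre_RangeDataSize cp_range prop_map → Spec_RangeDataSize cp_range prop_map (RangeDataSize cp_range prop_map)

-- ===== LEMMAS AND PROOFS =====

-- the per-codepoint extra cost A adds beyond the base 1, as a function of the lookup
def pvExtra (prop_map : List (Int × List Int)) (cp : Int) : Int :=
  match List.lookup cp prop_map with
  | none => 0
  | some s => if s.length = 1 then 0 else (s.length : Int)

lemma pvExtra_of_not_key (prop_map : List (Int × List Int)) (cp : Int)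
    (h : cp ∉ prop_map.map Prod.fst) : pvExtra prop_map cp = 0 := by
  induction prop_map with
  | nil => rfl
  | cons kv rest ih =>
    obtain ⟨k, v⟩ := kv
    simp only [List.map_cons, List.mem_cons, not_or] at h
    have hne : (cp == k) = false := by simpa using h.1
    have hlk : List.lookup cp ((k, v) :: rest) = List.lookup cp rest := by
      rw [List.lookup_cons, hne]
    unfold pvExtra
    rw [hlk]
    exact ih h.2

lemma sum_map_ite_key (l : List Int) (hl : l.Nodup) (k a : Int) (f : Int → Int) (hf : f k = 0) :
    (l.map (fun x => if x = k then a else f x)).sum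
      = (if k ∈ l then a else 0) + (l.map f).sum := by
  induction l with
  | nil => simp
  | cons x l ih =>
    obtain ⟨hx, hl'⟩ := List.nodup_cons.mp hl
    by_cases hxk : x = k
    · subst hxk
      have hmap : l.map (fun y => if y = x then a else f y) = l.map f :=
        List.map_congr_left (fun y hy => by
          have : y ≠ x := fun h => hx (h ▸ hy)
          simp [this])
      simp [hmap, hf]
    · have hkx : ¬ k = x := fun h => hxk h.symm
      have := ih hl'
      by_cases hk : k ∈ l <;> simp [hxk, hkx, hk, this] <;> ring

-- key lemma: with distinct keys, summing the extra cost over the range equals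
-- summing len(v) over the entries whose key lies in the range and has len(v) > 1
lemma sum_extra (lo hi : Int) (prop_map : List (Int × List Int))
    (hnd : (prop_map.map Prod.fst).Nodup) :
    ((PySem.List.pyRange lo hi 1).map (pvExtra prop_map)).sum
      = (prop_map.map (fun kv =>
          if lo ≤ kv.1 ∧ kv.1 < hi ∧ 1 < kv.2.length then (kv.2.length : Int) else 0)).sum := by
  induction prop_map with
  | nil =>
    have h0 : ∀ cp, pvExtra [] cp = (0 : Int) := fun _ => rfl
    rw [List.map_congr_left (fun cp _ => h0 cp)]
    simp
  | cons kv rest ih =>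
    obtain ⟨k, v⟩ := kv
    simp only [List.map_cons, List.nodup_cons] at hnd
    obtain ⟨hk, hnd'⟩ := hnd
    have hfun : ∀ cp, pvExtra ((k, v) :: rest) cp
        = if cp = k then (if v.length = 1 then 0 else (v.length : Int)) else pvExtra rest cp := by
      intro cp
      simp only [pvExtra, List.lookup_cons]
      by_cases h : cp = k
      · simp [h]
      · have : (cp == k) = false := by simpa using h
        rw [this]; simp [h]
    have hmap : (PySem.List.pyRange lo hi 1).map (pvExtra ((k, v) :: rest))
        = (PySem.List.pyRange lo hi 1).map
            (fun cp => if cp = k then (if v.length = 1 then 0 else (v.length : Int)) else pvExtra rest cp) :=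
      List.map_congr_left (fun cp _ => hfun cp)
    rw [hmap, sum_map_ite_key _ (PySem.List.nodup_pyRange_one lo hi) k _ _ (pvExtra_of_not_key rest k hk),
        ih hnd']
    congr 1
    by_cases hmem : k ∈ PySem.List.pyRange lo hi 1
    · have hb := PySem.List.mem_pyRange_one.mp hmem
      simp only [hmem, if_true]
      by_cases h1 : v.length = 1
      · simp [h1, hb]
      · by_cases h2 : 1 < v.length
        · simp [h1, hb, h2]
        · have : v.length = 0 := by omega
          simp [h1, hb, h2, this]
    · have hb : ¬ (lo ≤ k ∧ k < hi) := fun h => hmem (PySem.List.mem_pyRange_one.mpr h)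
      simp only [hmem, if_false]
      by_cases hlo : lo ≤ k
      · have : ¬ k < hi := fun h => hb ⟨hlo, h⟩
        simp [this]
      · simp [hlo]

-- ===== VERDICT (by name: the statement is the Claim_ definition above) =====
theorem RangeDataSize_spec : Claim_equal_RangeDataSize := by
  intro cp_range prop_map _ hpre
  unfold Spec_RangeDataSize RangeDataSize RangeDataSize_alt
  dsimp only
  set lo := PySem.List.pyGetD cp_range 0 0 with hlo
  set hi := PySem.List.pyGetD cp_range 1 0 with hhi
  have hbodyA : (PySem.List.pyRange lo hi 1).foldl
      (fun acc cp =>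
        match List.lookup cp prop_map with
        | none => acc + 1
        | some mapped_seq =>
          if mapped_seq.length = 1 then acc + 1 else acc + 1 + (mapped_seq.length : Int)) 0
      = (PySem.List.pyRange lo hi 1).foldl (fun acc cp => acc + (1 + pvExtra prop_map cp)) 0 := by
    apply PySem.List.foldl_congr_mem
    intro acc cp _
    unfold pvExtra
    cases List.lookup cp prop_map with
    | none => ring
    | some s => by_cases h : s.length = 1 <;> simp [h] <;> ring
  have hbodyB : prop_map.foldl
      (fun acc kv => if lo ≤ kv.1 ∧ kv.1 < hi ∧ 1 < kv.2.length then acc + (kv.2.length : Int) else acc)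
      (max 0 (hi - lo))
      = prop_map.foldl (fun acc kv =>
          acc + (if lo ≤ kv.1 ∧ kv.1 < hi ∧ 1 < kv.2.length then (kv.2.length : Int) else 0))
          (max 0 (hi - lo)) := by
    apply PySem.List.foldl_congr_mem
    intro acc kv _
    split <;> simp
  rw [hbodyA, hbodyB, PySem.List.foldl_add, PySem.List.foldl_add,
      PySem.List.sum_map_add_int, PySem.List.sum_map_const_int,
      PySem.List.length_pyRange_one, sum_extra lo hi prop_map hpre.2]
  have : ((hi - lo).toNat : Int) = max 0 (hi - lo) := by omega
  rw [this]
  ring
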